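-- pv_equiv track=rewrite | github.com/ASSERT-KTH/Mokav | experiments/pynguin/c4b/single-return/generated_tests/src_2613/7/src_2613.py | func
-- ===== SOURCE A (Python) =====
-- def func(*args):
--
-- 	s = args[0]
-- 	V = 'V'
-- 	K = 'K'
--
-- 	def g(s):
-- 	    res = 0
-- 	    for (i, c) in enumerate(list(s)):
-- 	        if (i == 0):
-- 	            continue
-- 	        if ((s[i] == K) and (s[(i - 1)] == V)):
-- 	            res += 1
-- 	    return res
--
-- 	def rev(c):
-- 	    if (c == V):
-- 	        return K
-- 	    else:
-- 	        return V
-- 	res = g(s)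
-- 	for i in range(len(s)):
-- 	    res = max(res, g(((s[:i] + rev(s[i])) + s[(i + 1):])))
-- 	return(res)
-- ===== SOURCE B (Python) =====
-- def func(*args):
--     # One O(n) pass: base VK-count plus the best local delta a single flip can add.
--     s = args[0]
--     n = len(s)
--     base = 0
--     best = 0
--     for i in range(n):
--         p = s[i - 1] if i > 0 else None
--         c = s[i]
--         nx = s[i + 1] if i + 1 < n else None
--         f = 'K' if c == 'V' else 'V'
--         old = (1 if (p == 'V' and c == 'K') else 0) + (1 if (c == 'V' and nx == 'K') else 0)
--         new = (1 if (p == 'V' and f == 'K') else 0) + (1 if (f == 'V' and nx == 'K') else 0)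
--         base += 1 if (p == 'V' and c == 'K') else 0
--         best = max(best, new - old)
--     return base + best
-- ===== Notes on version B (the rewrite author's own statement) =====
-- stated objective: faster
-- what changed: Instead of rebuilding the string and recounting all VK pairs for every flip position (nested scans), B makes one pass that accumulates the base VK count and, per position, the O(1) local delta a flip causes, returning base + max(0, best delta).
import Mathlib
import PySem

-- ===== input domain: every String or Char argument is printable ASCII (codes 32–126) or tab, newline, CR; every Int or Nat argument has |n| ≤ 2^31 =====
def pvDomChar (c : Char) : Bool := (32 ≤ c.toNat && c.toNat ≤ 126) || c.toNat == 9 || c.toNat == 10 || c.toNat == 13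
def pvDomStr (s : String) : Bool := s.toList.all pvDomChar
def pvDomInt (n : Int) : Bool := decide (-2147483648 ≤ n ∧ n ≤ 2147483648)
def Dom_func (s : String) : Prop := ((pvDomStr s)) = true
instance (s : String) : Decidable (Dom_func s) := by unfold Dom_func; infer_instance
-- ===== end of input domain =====

-- B replaces A's quadratic flip-and-recount by a single linear pass (base count + best local flip delta); return values proved equal.

-- ===== PORT A =====
def funcRev (c : Char) : Char := if c == 'V' then 'K' else 'V'

def funcG (l : List Char) : Int :=
  (PySem.List.enumerate l 0).foldl (fun res p =>
    if p.1 == 0 then res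
    else if (PySem.List.pyGetD l p.1 ' ' == 'K') && (PySem.List.pyGetD l (p.1 - 1) ' ' == 'V')
      then res + 1 else res) 0

def func (s : String) : Int :=
  let l := s.toList
  let res := funcG l
  (PySem.List.pyRange 0 (l.length : Int) 1).foldl (fun res i =>
    max res (funcG ((PySem.List.slice l none (some i) ++ [funcRev (PySem.List.pyGetD l i ' ')])
      ++ PySem.List.slice l (some (i + 1)) none))) res

-- ===== PORT B =====
def func_alt (s : String) : Int :=
  let l := s.toList
  let n := (l.length : Int)
  let st := (PySem.List.pyRange 0 n 1).foldl (fun (st : Int × Int) i =>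
    let p : Option Char := if 0 < i then some (PySem.List.pyGetD l (i - 1) ' ') else none
    let c := PySem.List.pyGetD l i ' '
    let nx : Option Char := if i + 1 < n then some (PySem.List.pyGetD l (i + 1) ' ') else none
    let f := if c == 'V' then 'K' else 'V'
    let old := (if p == some 'V' && c == 'K' then (1 : Int) else 0)
             + (if c == 'V' && nx == some 'K' then (1 : Int) else 0)
    let nw := (if p == some 'V' && f == 'K' then (1 : Int) else 0)
            + (if f == 'V' && nx == some 'K' then (1 : Int) else 0)
    (st.1 + (if p == some 'V' && c == 'K' then (1 : Int) else 0), max st.2 (nw - old)))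
    ((0 : Int), (0 : Int))
  st.1 + st.2

-- ===== PRECONDITION & SPEC =====
def Spec_func (s : String) (out : Int) : Prop := out = func_alt s
instance (s : String) (out : Int) : Decidable (Spec_func s out) := by unfold Spec_func; infer_instance

-- ===== CLAIM (what is proved, stated in full; the proofs are below) =====
def Claim_equal_func : Prop := ∀ (s : String), Dom_func s → Spec_func s (func s)

-- ===== LEMMAS AND PROOFS =====

-- number of adjacent 'V','K' pairs, structurally
def pvPair (a b : Char) : Int := if a == 'V' && b == 'K' then 1 else 0
def pvHP (a : Char) : List Char → Int
  | [] => 0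
  | b :: _ => pvPair a b
def pvCnt : List Char → Int
  | [] => 0
  | a :: r => pvHP a r + pvCnt r

def pvOld (l : List Char) (i : Int) : Int :=
  (if 0 < i then pvPair (PySem.List.pyGetD l (i - 1) ' ') (PySem.List.pyGetD l i ' ') else 0)
  + (if i + 1 < (l.length : Int) then pvPair (PySem.List.pyGetD l i ' ') (PySem.List.pyGetD l (i + 1) ' ') else 0)
def pvNew (l : List Char) (i : Int) (c : Char) : Int :=
  (if 0 < i then pvPair (PySem.List.pyGetD l (i - 1) ' ') c else 0)
  + (if i + 1 < (l.length : Int) then pvPair c (PySem.List.pyGetD l (i + 1) ' ') else 0)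
def pvDelta (l : List Char) (i : Int) : Int :=
  pvNew l i (funcRev (PySem.List.pyGetD l i ' ')) - pvOld l i

lemma pvOptBeqSome (a b : Char) : ((some a : Option Char) == some b) = (a == b) := rfl
lemma pvOptBeqNone (b : Char) : ((none : Option Char) == some b) = false := rfl

lemma pvGetD_cons_succ (a : Char) (l : List Char) (i : Int) (hi : 0 ≤ i) :
    PySem.List.pyGetD (a :: l) (i + 1) ' ' = PySem.List.pyGetD l i ' ' := by
  obtain ⟨k, rfl⟩ : ∃ k : Nat, i = (k : Int) := ⟨i.toNat, (Int.toNat_of_nonneg hi).symm⟩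
  have h1 : (k : Int) + 1 = ((k + 1 : Nat) : Int) := by push_cast; ring
  rw [h1, PySem.List.pyGetD_natCast, PySem.List.pyGetD_natCast, List.getD_cons_succ]

lemma pvRange_shift (a b : Int) :
    PySem.List.pyRange (a + 1) b 1 = (PySem.List.pyRange a (b - 1) 1).map (· + 1) := by
  rw [PySem.List.pyRange_one, PySem.List.pyRange_one, List.map_map]
  have hb : (b - (a + 1)).toNat = (b - 1 - a).toNat := by omega
  rw [hb]
  apply List.map_congr_left
  intro k _
  simp only [Function.comp_apply]
  ring

-- C1: adjacent-pair indexed sum equals pvCnt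
lemma pvSumAdj (l : List Char) : ∀ acc : Int,
    (PySem.List.pyRange 0 ((l.length : Int) - 1) 1).foldl
      (fun acc i => acc + pvPair (PySem.List.pyGetD l i ' ') (PySem.List.pyGetD l (i + 1) ' ')) acc
    = acc + pvCnt l := by
  induction l with
  | nil =>
    intro acc
    rw [PySem.List.pyRange_one_eq_nil (by norm_num)]
    simp [pvCnt]
  | cons a r ih =>
    intro acc
    cases r with
    | nil =>
      rw [PySem.List.pyRange_one_eq_nil (by norm_num)]
      simp [pvCnt, pvHP]
    | cons b r' =>
      have hlen : ((a :: b :: r').length : Int) - 1 = ((b :: r').length : Int) := by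
        push_cast [List.length_cons]; ring
      have hpos : (0 : Int) < ((b :: r').length : Int) := by
        have := List.length_pos_of_ne_nil (l := b :: r') (by simp)
        exact_mod_cast this
      rw [hlen, PySem.List.pyRange_one_cons hpos]
      simp only [List.foldl_cons]
      have h0 : PySem.List.pyGetD (a :: b :: r') 0 ' ' = a := PySem.List.pyGetD_zero_cons _ _ _
      have h1 : PySem.List.pyGetD (a :: b :: r') (0 + 1) ' ' = b := by
        rw [pvGetD_cons_succ _ _ 0 le_rfl]
        exact PySem.List.pyGetD_zero_cons _ _ _
      rw [h0, h1]
      rw [pvRange_shift 0 ((b :: r').length : Int), List.foldl_map]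
      have hc := PySem.List.foldl_congr_mem
        (PySem.List.pyRange 0 (((b :: r').length : Int) - 1) 1)
        (fun acc i => acc + pvPair (PySem.List.pyGetD (a :: b :: r') (i + 1) ' ')
            (PySem.List.pyGetD (a :: b :: r') (i + 1 + 1) ' '))
        (fun acc i => acc + pvPair (PySem.List.pyGetD (b :: r') i ' ')
            (PySem.List.pyGetD (b :: r') (i + 1) ' '))
        (acc + pvPair a b)
        (by
          intro acc2 i hi
          have hmem := (PySem.List.mem_pyRange_one).1 hi
          have e1 : PySem.List.pyGetD (a :: b :: r') (i + 1) ' ' = PySem.List.pyGetD (b :: r') i ' ' :=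
            pvGetD_cons_succ _ _ i hmem.1
          have e2 : PySem.List.pyGetD (a :: b :: r') (i + 1 + 1) ' ' = PySem.List.pyGetD (b :: r') (i + 1) ' ' :=
            pvGetD_cons_succ _ _ (i + 1) (by omega)
          dsimp only
          rw [e1, e2])
      rw [hc, ih (acc + pvPair a b)]
      simp only [pvCnt, pvHP]
      ring

-- C2: guarded indexed sum equals pvCnt
lemma pvSumGuard (l : List Char) (acc : Int) :
    (PySem.List.pyRange 0 (l.length : Int) 1).foldl
      (fun acc i => acc + (if 0 < i then pvPair (PySem.List.pyGetD l (i - 1) ' ') (PySem.List.pyGetD l i ' ') else 0)) acc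
    = acc + pvCnt l := by
  cases l with
  | nil =>
    rw [PySem.List.pyRange_one_eq_nil (by norm_num)]
    simp [pvCnt]
  | cons a r =>
    have hpos : (0 : Int) < ((a :: r).length : Int) := by
      have := List.length_pos_of_ne_nil (l := a :: r) (by simp)
      exact_mod_cast this
    rw [PySem.List.pyRange_one_cons hpos]
    simp only [List.foldl_cons, lt_irrefl, if_false, add_zero]
    rw [pvRange_shift 0 ((a :: r).length : Int), List.foldl_map]
    have hc := PySem.List.foldl_congr_mem
      (PySem.List.pyRange 0 (((a :: r).length : Int) - 1) 1)
      (fun acc i => acc + (if 0 < i + 1 then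
          pvPair (PySem.List.pyGetD (a :: r) (i + 1 - 1) ' ') (PySem.List.pyGetD (a :: r) (i + 1) ' ') else 0))
      (fun acc i => acc + pvPair (PySem.List.pyGetD (a :: r) i ' ') (PySem.List.pyGetD (a :: r) (i + 1) ' '))
      acc
      (by
        intro acc2 i hi
        have hmem := (PySem.List.mem_pyRange_one).1 hi
        dsimp only
        rw [if_pos (by omega : (0:Int) < i + 1), show i + 1 - 1 = i from by ring])
    rw [hc]
    exact pvSumAdj (a :: r) acc

-- C3: A's inner counter equals pvCnt
lemma pvG_eq_cnt (l : List Char) : funcG l = pvCnt l := by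
  unfold funcG
  rw [PySem.List.enumerate_eq_map_pyRange l ' ', List.foldl_map]
  rw [show PySem.List.len l = ((l.length : Int)) from rfl]
  dsimp only
  have hc := PySem.List.foldl_congr_mem
    (PySem.List.pyRange 0 ((l.length : Int)) 1)
    (fun res i => if (i == (0:Int)) = true then res
      else if ((PySem.List.pyGetD l i ' ' == 'K') && (PySem.List.pyGetD l (i - 1) ' ' == 'V')) = true
        then res + 1 else res)
    (fun res i => res + (if 0 < i then pvPair (PySem.List.pyGetD l (i - 1) ' ') (PySem.List.pyGetD l i ' ') else 0))
    (0 : Int)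
    (by
      intro res i hi
      have hmem := (PySem.List.mem_pyRange_one).1 hi
      dsimp only
      by_cases h0 : i = 0
      · subst h0; simp
      · have hpos : (0 : Int) < i := by omega
        have hne : (i == (0 : Int)) = false := by simp [h0]
        rw [hne]
        simp only [Bool.false_eq_true, if_false, if_pos hpos, pvPair]
        cases hK : (PySem.List.pyGetD l i ' ' == 'K') <;>
          cases hV : (PySem.List.pyGetD l (i - 1) ' ' == 'V') <;>
            simp_all)
  rw [hc, pvSumGuard l 0]
  ring

-- C4: flipping one char changes pvCnt by the local delta
lemma pvCnt_set (l : List Char) : ∀ (i : Int) (c : Char), 0 ≤ i → i < (l.length : Int) →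
    pvCnt (l.set i.toNat c) = pvCnt l + (pvNew l i c - pvOld l i) := by
  induction l with
  | nil =>
    intro i c h0 h1
    simp only [List.length_nil, Nat.cast_zero] at h1
    omega
  | cons a r ih =>
    intro i c h0 h1
    have hlr : ((a :: r).length : Int) = (r.length : Int) + 1 := by
      push_cast [List.length_cons]; ring
    by_cases hi0 : i = 0
    · subst hi0
      simp only [Int.toNat_zero, List.set_cons_zero]
      cases r with
      | nil =>
        simp only [pvCnt, pvHP, pvOld, pvNew, PySem.List.pyGetD_zero_cons, lt_irrefl, if_false]
        norm_num
      | cons b r' =>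
        have hg : (0:Int) + 1 < ((a :: b :: r').length : Int) := by
          push_cast [List.length_cons]; omega
        have hb : PySem.List.pyGetD (a :: b :: r') (0 + 1) ' ' = b := by
          rw [pvGetD_cons_succ _ _ 0 le_rfl]
          exact PySem.List.pyGetD_zero_cons _ _ _
        have hb2 : PySem.List.pyGetD (c :: b :: r') (0 + 1) ' ' = b := by
          rw [pvGetD_cons_succ _ _ 0 le_rfl]
          exact PySem.List.pyGetD_zero_cons _ _ _
        simp only [pvCnt, pvHP, pvOld, pvNew, PySem.List.pyGetD_zero_cons, hb,
          if_pos hg, lt_irrefl, if_false]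
        ring
    · have hpos : (0 : Int) < i := by omega
      have hj1 : i - 1 < (r.length : Int) := by omega
      have hit : i.toNat = (i - 1).toNat + 1 := by omega
      rw [hit, List.set_cons_succ]
      have ihr := ih (i - 1) c (by omega) hj1
      simp only [pvCnt] at ihr ⊢
      rw [ihr]
      have g1 : PySem.List.pyGetD (a :: r) i ' ' = PySem.List.pyGetD r (i - 1) ' ' := by
        have := pvGetD_cons_succ a r (i - 1) (by omega)
        rw [show i - 1 + 1 = i from by ring] at this
        exact this
      have g2 : PySem.List.pyGetD (a :: r) (i + 1) ' ' = PySem.List.pyGetD r i ' ' :=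
        pvGetD_cons_succ a r i (by omega)
      simp only [pvOld, pvNew, g1, g2, hlr, if_pos hpos]
      rw [show i - 1 + 1 = i from by ring]
      have hg2 : (i + 1 < (r.length : Int) + 1) ↔ (i < (r.length : Int)) := by omega
      simp only [hg2]
      by_cases hone : i = 1
      · subst hone
        norm_num
        cases r with
        | nil => simp at hj1
        | cons b r2 =>
          simp only [List.set_cons_zero, pvHP, PySem.List.pyGetD_zero_cons]
          ring
      · have h2 : (2:Int) ≤ i := by omega
        have g3 : PySem.List.pyGetD (a :: r) (i - 1) ' ' = PySem.List.pyGetD r (i - 2) ' ' := by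
          have := pvGetD_cons_succ a r (i - 2) (by omega)
          rw [show i - 2 + 1 = i - 1 from by ring] at this
          exact this
        rw [show i - 1 - 1 = i - 2 from by ring]
        simp only [g3, if_pos (show (0:Int) < i - 1 from by omega)]
        have hhp : pvHP a (r.set (i - 1).toNat c) = pvHP a r := by
          cases r with
          | nil => simp only [List.length_nil, Nat.cast_zero] at hj1; omega
          | cons b r2 =>
            have : (i - 1).toNat = (i - 2).toNat + 1 := by omega
            rw [this, List.set_cons_succ]
            simp [pvHP]
        rw [hhp]
        ring

-- generic: a max-fold over values shifted by a constant
lemma pvFoldlMaxAdd (J : List Int) (C : Int) (d : Int → Int) : ∀ x : Int,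
    J.foldl (fun res i => max res (C + d i)) (C + x) = C + J.foldl (fun b i => max b (d i)) x := by
  induction J with
  | nil => intro x; simp
  | cons j J ih =>
    intro x
    rw [List.foldl_cons, List.foldl_cons]
    have : max (C + x) (C + d j) = C + max x (d j) := by omega
    rw [this, ih]

lemma pvFoldlMaxAdd0 (J : List Int) (C : Int) (d : Int → Int) :
    J.foldl (fun res i => max res (C + d i)) C = C + J.foldl (fun b i => max b (d i)) 0 := by
  have h := pvFoldlMaxAdd J C d 0
  rw [add_zero] at h
  exact h

-- A's value in closed form: base count plus best flip delta
lemma pvA_eq (s : String) :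
    func s = pvCnt s.toList
      + List.foldl (fun b i => max b (pvDelta s.toList i)) 0
          (PySem.List.pyRange 0 (s.toList.length : Int) 1) := by
  show List.foldl (fun res i =>
      max res (funcG ((PySem.List.slice s.toList none (some i)
          ++ [funcRev (PySem.List.pyGetD s.toList i ' ')])
        ++ PySem.List.slice s.toList (some (i + 1)) none))) (funcG s.toList)
      (PySem.List.pyRange 0 ((s.toList.length : Int)) 1) = _
  have hc := PySem.List.foldl_congr_mem
    (PySem.List.pyRange 0 ((s.toList.length : Int)) 1)
    (fun res i =>
      max res (funcG ((PySem.List.slice s.toList none (some i)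
          ++ [funcRev (PySem.List.pyGetD s.toList i ' ')])
        ++ PySem.List.slice s.toList (some (i + 1)) none)))
    (fun res i => max res (pvCnt s.toList + pvDelta s.toList i))
    (funcG s.toList)
    (by
      intro res i hi
      obtain ⟨h0, h1⟩ := PySem.List.mem_pyRange_one.1 hi
      have hn : i.toNat < s.toList.length := by omega
      have hsl1 : PySem.List.slice s.toList none (some i) = s.toList.take i.toNat :=
        PySem.List.slice_to _ h0
      have hsl2 : PySem.List.slice s.toList (some (i + 1)) none = s.toList.drop (i + 1).toNat :=
        PySem.List.slice_from _ (by omega)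
      have htn : (i + 1).toNat = i.toNat + 1 := by omega
      dsimp only
      rw [hsl1, hsl2, htn]
      have hset : (s.toList.take i.toNat ++ [funcRev (PySem.List.pyGetD s.toList i ' ')])
            ++ s.toList.drop (i.toNat + 1)
          = s.toList.set i.toNat (funcRev (PySem.List.pyGetD s.toList i ' ')) := by
        rw [List.set_eq_take_cons_drop _ hn]
        simp
      rw [hset, pvG_eq_cnt, pvCnt_set s.toList i _ h0 h1]
      unfold pvDelta
      ring_nf)
  rw [hc, pvG_eq_cnt, pvFoldlMaxAdd0]

-- B's value in the same closed form
lemma pvB_eq (s : String) :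
    func_alt s = pvCnt s.toList
      + List.foldl (fun b i => max b (pvDelta s.toList i)) 0
          (PySem.List.pyRange 0 (s.toList.length : Int) 1) := by
  simp only [func_alt]
  rw [PySem.List.foldl_prod_mk
    (fun (acc : Int) (i : Int) => acc +
      (if ((if 0 < i then some (PySem.List.pyGetD s.toList (i - 1) ' ') else none) == some 'V'
          && (PySem.List.pyGetD s.toList i ' ' == 'K')) then (1 : Int) else 0))
    (fun (acc : Int) (i : Int) => max acc
      (((if ((if 0 < i then some (PySem.List.pyGetD s.toList (i - 1) ' ') else none) == some 'V'
            && ((if PySem.List.pyGetD s.toList i ' ' == 'V' then 'K' else 'V') == 'K')) then (1 : Int) else 0)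
        + (if (((if PySem.List.pyGetD s.toList i ' ' == 'V' then 'K' else 'V') == 'V')
            && ((if i + 1 < (s.toList.length : Int) then some (PySem.List.pyGetD s.toList (i + 1) ' ') else none) == some 'K')) then (1 : Int) else 0))
       - ((if ((if 0 < i then some (PySem.List.pyGetD s.toList (i - 1) ' ') else none) == some 'V'
            && (PySem.List.pyGetD s.toList i ' ' == 'K')) then (1 : Int) else 0)
        + (if ((PySem.List.pyGetD s.toList i ' ' == 'V')
            && ((if i + 1 < (s.toList.length : Int) then some (PySem.List.pyGetD s.toList (i + 1) ' ') else none) == some 'K')) then (1 : Int) else 0))))]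
  dsimp only
  have hfst := PySem.List.foldl_congr_mem
    (PySem.List.pyRange 0 ((s.toList.length : Int)) 1)
    (fun (acc : Int) (i : Int) => acc +
      (if ((if 0 < i then some (PySem.List.pyGetD s.toList (i - 1) ' ') else none) == some 'V'
          && (PySem.List.pyGetD s.toList i ' ' == 'K')) then (1 : Int) else 0))
    (fun acc i => acc + (if 0 < i then
        pvPair (PySem.List.pyGetD s.toList (i - 1) ' ') (PySem.List.pyGetD s.toList i ' ') else 0))
    (0 : Int)
    (by
      intro acc i _
      dsimp only
      by_cases hp : (0 : Int) < i
      · rw [if_pos hp, if_pos hp, pvOptBeqSome, pvPair]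
      · rw [if_neg hp, if_neg hp, pvOptBeqNone]
        simp)
  have hsnd := PySem.List.foldl_congr_mem
    (PySem.List.pyRange 0 ((s.toList.length : Int)) 1)
    (fun (acc : Int) (i : Int) => max acc
      (((if ((if 0 < i then some (PySem.List.pyGetD s.toList (i - 1) ' ') else none) == some 'V'
            && ((if PySem.List.pyGetD s.toList i ' ' == 'V' then 'K' else 'V') == 'K')) then (1 : Int) else 0)
        + (if (((if PySem.List.pyGetD s.toList i ' ' == 'V' then 'K' else 'V') == 'V')
            && ((if i + 1 < (s.toList.length : Int) then some (PySem.List.pyGetD s.toList (i + 1) ' ') else none) == some 'K')) then (1 : Int) else 0))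
       - ((if ((if 0 < i then some (PySem.List.pyGetD s.toList (i - 1) ' ') else none) == some 'V'
            && (PySem.List.pyGetD s.toList i ' ' == 'K')) then (1 : Int) else 0)
        + (if ((PySem.List.pyGetD s.toList i ' ' == 'V')
            && ((if i + 1 < (s.toList.length : Int) then some (PySem.List.pyGetD s.toList (i + 1) ' ') else none) == some 'K')) then (1 : Int) else 0))))
    (fun acc i => max acc (pvDelta s.toList i))
    (0 : Int)
    (by
      intro acc i _
      dsimp only
      unfold pvDelta pvNew pvOld funcRev pvPair
      by_cases hp : (0 : Int) < i <;>
        by_cases hq : i + 1 < (s.toList.length : Int) <;>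
          simp only [hp, hq, if_false, pvOptBeqSome, pvOptBeqNone, Bool.and_false,
            Bool.false_and, if_pos] <;>
            simp)
  rw [hfst, hsnd, pvSumGuard s.toList 0]
  ring

-- ===== VERDICT (by name: the statement is the Claim_ definition above) =====
theorem func_spec : Claim_equal_func := by
  intro s _
  unfold Spec_func
  rw [pvA_eq, pvB_eq]
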